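-- pv_equiv track=rewrite | github.com/zlightho/algo | 28/task19.py | TransformTransform
-- ===== SOURCE A (Python) =====
-- from typing import List
--
-- def transform(arr: List[int]) -> List[int]:
--     """
--     Perform a transformation on the input array as per the given algorithm.
--
--     :param arr: A list of positive integers.
--     :return: A list of integers after applying the transformation.
--
--     The transformation algorithm consists of the following steps:
--     1. Initialize an empty list called 'result'.
--     2. Loop through the elements of the input array 'arr' with two nested loops.
--     3. Calculate the value of 'k' as the sum of the loop indices 'i' and 'j'.
--     4. Extract a subarray from 'arr' starting from index 'j' to index 'k' (inclusive).
--     5. Find the maximum value in the subarray and append it to the 'result' list.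
--     """
--     result = []
--     n = len(arr)
--     for i in range(n):
--         for j in range(n - i - 1):
--             k = i + j
--             result.append(max(arr[j:k+1]))
--     return result
--
-- def TransformTransform(A: List[int], N: int) -> bool:
--     """
--     Calculate the key by applying the transform function twice and check if the key is even.
--
--     :param A: A list of positive integers.
--     :param N: The length of the input list A.
--     :return: True if the sum of all values in the result of the double transformation is even, False otherwise.
--
--     The function performs the following steps:
--     1. Apply the 'transform' function to the input list 'A' to obtain the first transformation result.
--     2. Apply the 'transform' function to the first transformation result to obtain the second transformation result.
--     3. Calculate the key as the sum of all elements in the second transformation result.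
--     4. Check if the key is even and return True if it is, otherwise return False.
--     """
--     B = []
--     summ = 0
--     res = False
--     B = transform(A)
--     B = transform(B)
--     for i in range(len(B)):
--         summ = summ + B[i]
--     if summ % 2 == 0:
--         res = True
--     return res
-- ===== SOURCE B (Python) =====
-- from typing import List
--
-- def TransformTransform(A: List[int], N: int) -> bool:
--     # Same value as A: sliding-window maxima per window length via an
--     # incremental max row (DP), instead of recomputing max over each slice.
--     def tr(arr):
--         n = len(arr)
--         res = []
--         row = list(arr)  # row[j] == max(arr[j:j+L]) at the start of iteration L
--         for L in range(1, n + 1):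
--             res += row[:n - L]
--             row = [max(x, y) for x, y in zip(row, arr[L:])]
--         return res
--     return sum(tr(tr(A))) % 2 == 0
-- ===== Notes on version B (the rewrite author's own statement) =====
-- stated objective: faster
-- what changed: Replaces the per-slice max recomputation (a fresh max over arr[j:k+1] for every window) with an incremental DP row that extends all window maxima of one length to the next in a single zip/max pass, applied twice, summing the result directly.
import Mathlib
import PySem

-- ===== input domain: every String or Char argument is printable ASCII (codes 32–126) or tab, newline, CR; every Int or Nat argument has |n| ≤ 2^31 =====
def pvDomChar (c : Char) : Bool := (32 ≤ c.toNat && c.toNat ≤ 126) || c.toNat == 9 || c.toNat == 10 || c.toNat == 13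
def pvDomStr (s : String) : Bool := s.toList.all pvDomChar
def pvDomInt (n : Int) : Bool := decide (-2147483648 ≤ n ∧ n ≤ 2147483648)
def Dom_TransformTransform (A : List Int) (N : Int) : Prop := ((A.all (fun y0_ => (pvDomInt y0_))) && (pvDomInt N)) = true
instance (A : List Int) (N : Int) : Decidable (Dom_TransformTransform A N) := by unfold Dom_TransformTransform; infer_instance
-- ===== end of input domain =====

-- B replaces A's per-slice max recomputation by an incremental DP row of window maxima
-- (one zip/max pass per window length), applied twice; objective: faster (asymptotic).


-- ===== PORT A =====
-- Python max(l) on a list of ints; raises only on l = [], and every slice A's loops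
-- take is nonempty (j < k+1 ≤ n), so the .getD default is never read.
def pyMaxA (l : List Int) : Int := (PySem.List.max? l (fun y => y)).getD 0

-- transform: result.append(max(arr[j:k+1])) with k = i + j, for i < n, j < n - i - 1
def transformA (arr : List Int) : List Int :=
  let n := arr.length
  (List.range n).foldl (fun result i =>
    (List.range (n - i - 1)).foldl (fun result (j : Nat) =>
      result ++ [pyMaxA (PySem.List.slice arr (some (j : Int)) (some ((j : Int) + ((i + 1 : Nat) : Int))))])
      result) []

def TransformTransform (A : List Int) (N : Int) : Bool :=
  let B := transformA (transformA A)
  let summ := (PySem.List.pyRange 0 (PySem.List.len B)).foldl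
      (fun summ i => summ + PySem.List.pyGetD B i 0) 0
  if PySem.Int.mod summ 2 = 0 then true else false

-- ===== PORT B =====
-- Source B's tr: row[j] = max(arr[j:j+L]); per L emit row[:n-L] and update row by a zip/max pass.
-- 'for L in range(1, n+1)' is transcribed as i over List.range n with L = i + 1.
def transformB (arr : List Int) : List Int :=
  let n := arr.length
  ((List.range n).foldl (fun (st : List Int × List Int) i =>
      (st.1 ++ st.2.take (n - (i + 1)),
       (st.2.zip (arr.drop (i + 1))).map (fun p => max p.1 p.2)))
    ([], arr)).1

def TransformTransform_alt (A : List Int) (N : Int) : Bool :=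
  PySem.Int.mod (transformB (transformB A)).sum 2 == 0

-- ===== PRECONDITION & SPEC =====
def Spec_TransformTransform (A : List Int) (N : Int) (out : Bool) : Prop := out = TransformTransform_alt A N
instance (A : List Int) (N : Int) (out : Bool) : Decidable (Spec_TransformTransform A N out) := by unfold Spec_TransformTransform; infer_instance

-- ===== CLAIM (what is proved, stated in full; the proofs are below) =====
def Claim_equal_TransformTransform : Prop := ∀ (A : List Int) (N : Int), Dom_TransformTransform A N → Spec_TransformTransform A N (TransformTransform A N)

-- ===== LEMMAS AND PROOFS =====

-- max of the window arr[j : j+L]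
def wmax (arr : List Int) (j L : Nat) : Int := pyMaxA ((arr.drop j).take L)

-- the chunk of the result produced for window length i+1
def chunk (arr : List Int) (i : Nat) : List Int :=
  (List.range (arr.length - i - 1)).map (fun j => wmax arr j (i + 1))

lemma pyMaxA_cons (x : Int) (t : List Int) : pyMaxA (x :: t) = t.foldl max x := by
  simp [pyMaxA, PySem.List.max?_id_cons]

lemma pyMaxA_append (l : List Int) (x : Int) (h : l ≠ []) :
    pyMaxA (l ++ [x]) = max (pyMaxA l) x := by
  cases l with
  | nil => exact absurd rfl h
  | cons y t => simp [pyMaxA_cons, List.foldl_append]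

lemma wmax_one (arr : List Int) (j : Nat) (h : j < arr.length) :
    wmax arr j 1 = arr[j] := by
  have hd : arr.drop j = arr[j] :: arr.drop (j + 1) := List.drop_eq_getElem_cons h
  unfold wmax
  rw [hd]
  show pyMaxA [arr[j]] = arr[j]
  rw [pyMaxA_cons]
  rfl

lemma wmax_succ (arr : List Int) (j L : Nat) (hL : 1 ≤ L) (h : j + L < arr.length) :
    wmax arr j (L + 1) = max (wmax arr j L) arr[j + L] := by
  have hlen : L < (arr.drop j).length := by simp; omega
  have htake : (arr.drop j).take (L + 1) = (arr.drop j).take L ++ [(arr.drop j)[L]] := by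
    rw [List.take_add_one]
    simp [List.getElem?_eq_getElem hlen]
  have hne : (arr.drop j).take L ≠ [] := by
    intro hc
    have := congrArg List.length hc
    simp at this
    omega
  rw [wmax, htake, pyMaxA_append _ _ hne]
  congr 1
  simp [List.getElem_drop]

lemma transformA_eq (arr : List Int) :
    transformA arr = (List.range arr.length).flatMap (chunk arr) := by
  have hfun : ∀ (result : List Int) (i : Nat),
      (List.range (arr.length - i - 1)).foldl (fun result (j : Nat) =>
        result ++ [pyMaxA (PySem.List.slice arr (some (j : Int)) (some ((j : Int) + ((i + 1 : Nat) : Int))))])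
        result
      = result ++ chunk arr i := by
    intro result i
    rw [PySem.List.foldl_append_singleton_eq_map]
    congr 1
    apply List.map_congr_left
    intro j _
    rw [PySem.List.slice_natCast_add]
    rfl
  unfold transformA
  show (List.range arr.length).foldl (fun result i =>
      (List.range (arr.length - i - 1)).foldl (fun result (j : Nat) =>
        result ++ [pyMaxA (PySem.List.slice arr (some (j : Int)) (some ((j : Int) + ((i + 1 : Nat) : Int))))])
        result) [] = _
  simp only [hfun]
  simpa using PySem.List.foldl_append_eq_flatMap (chunk arr) (List.range arr.length) []

-- the DP row at the start of the iteration for window length i+1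
def rowAt (arr : List Int) (i : Nat) : List Int :=
  (List.range (arr.length - i)).map (fun j => wmax arr j (i + 1))

lemma rowAt_zero (arr : List Int) : rowAt arr 0 = arr := by
  apply List.ext_getElem
  · simp [rowAt]
  · intro j h1 h2
    have hj : j < arr.length := by simpa [rowAt] using h2
    simp [rowAt, wmax_one arr j hj]

lemma rowAt_step (arr : List Int) (i : Nat) (hi : i < arr.length) :
    ((rowAt arr i).zip (arr.drop (i + 1))).map (fun p => max p.1 p.2) = rowAt arr (i + 1) := by
  apply List.ext_getElem
  · simp [rowAt]; omega
  · intro j h1 h2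
    have hj : j < arr.length - i - 1 := by simpa [rowAt] using h2
    simp only [rowAt, List.getElem_map, List.getElem_zip, List.getElem_drop, List.getElem_range]
    have hidx : i + 1 + j = j + (i + 1) := by omega
    simp only [hidx]
    rw [wmax_succ arr j (i + 1) (by omega) (by omega)]

lemma transformB_inv (arr : List Int) (m : Nat) (hm : m ≤ arr.length) :
    (List.range m).foldl (fun (st : List Int × List Int) i =>
      (st.1 ++ st.2.take (arr.length - (i + 1)),
       (st.2.zip (arr.drop (i + 1))).map (fun p => max p.1 p.2)))
      ([], arr)
    = ((List.range m).flatMap (chunk arr), rowAt arr m) := by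
  induction m with
  | zero => simp [rowAt_zero]
  | succ k ih =>
    rw [List.range_succ, List.foldl_append, ih (by omega)]
    simp only [List.foldl_cons, List.foldl_nil, Prod.mk.injEq]
    refine ⟨?_, rowAt_step arr k (by omega)⟩
    rw [List.flatMap_append]
    congr 1
    simp only [List.flatMap_cons, List.flatMap_nil, List.append_nil]
    unfold rowAt chunk
    rw [← List.map_take, List.take_range]
    congr 2
    omega

lemma transformB_eq (arr : List Int) :
    transformB arr = (List.range arr.length).flatMap (chunk arr) := by
  unfold transformB
  show ((List.range arr.length).foldl (fun (st : List Int × List Int) i =>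
      (st.1 ++ st.2.take (arr.length - (i + 1)),
       (st.2.zip (arr.drop (i + 1))).map (fun p => max p.1 p.2)))
      ([], arr)).1 = _
  rw [transformB_inv arr arr.length le_rfl]

lemma transforms_agree (arr : List Int) : transformA arr = transformB arr := by
  rw [transformA_eq, transformB_eq]

-- ===== VERDICT (by name: the statement is the Claim_ definition above) =====
theorem TransformTransform_spec : Claim_equal_TransformTransform := by
  intro A N _
  unfold Spec_TransformTransform TransformTransform TransformTransform_alt
  show (if PySem.Int.mod ((PySem.List.pyRange 0 (PySem.List.len (transformA (transformA A)))).foldl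
          (fun summ i => summ + PySem.List.pyGetD (transformA (transformA A)) i 0) 0) 2 = 0
        then true else false)
      = (PySem.Int.mod (transformB (transformB A)).sum 2 == 0)
  rw [transforms_agree, transforms_agree]
  have hsum : (PySem.List.pyRange 0 (PySem.List.len (transformB (transformB A)))).foldl
      (fun summ i => summ + PySem.List.pyGetD (transformB (transformB A)) i 0) 0
      = (transformB (transformB A)).sum := by
    rw [PySem.List.foldl_pyRange_pyGetD (transformB (transformB A)) 0 (fun s x => s + x) 0 (by norm_num)]
    rw [List.sum_eq_foldl]
    rfl
  rw [hsum]
  by_cases h : PySem.Int.mod (transformB (transformB A)).sum 2 = 0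
  · rw [if_pos h, h]
    rfl
  · rw [if_neg h]
    exact (beq_eq_false_iff_ne.mpr h).symm
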